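-- pv_equiv track=rewrite | github.com/iamhduy/leetcode-prac | finished/2016.py | maxDiff
-- ===== SOURCE A (Python) =====
-- def maxDiff(num_l):
--     max_diff = -1
--     min_num = num_l[0]
--
--     for i in range(1, len(num_l)):
--         if num_l[i] > min_num:
--             max_diff = max(max_diff, num_l[i] - min_num)
--         else:
--             min_num = num_l[i]
--
--     return max_diff
-- ===== SOURCE B (Python) =====
-- def maxDiff(num_l):
--     # suffix-maximum pass (right-to-left), then a forward scan
--     n = len(num_l)
--     best = num_l[-1]              # IndexError on empty input, like A
--     best_after = [0] * n          # best_after[i] = max of num_l[i+1:]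
--     for i in range(n - 2, -1, -1):
--         best_after[i] = best
--         if num_l[i] > best:
--             best = num_l[i]
--     ans = -1
--     for i in range(n - 1):
--         if best_after[i] > num_l[i]:
--             ans = max(ans, best_after[i] - num_l[i])
--     return ans
-- ===== Notes on version B (the rewrite author's own statement) =====
-- stated objective: alternative
-- what changed: Replaces A's single forward pass tracking the running minimum with a two-pass suffix-maximum scheme: a right-to-left pass builds best_after[i] = max of elements after i, then a forward pass maximises best_after[i] - num_l[i] over indices where it is positive.
import Mathlib
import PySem

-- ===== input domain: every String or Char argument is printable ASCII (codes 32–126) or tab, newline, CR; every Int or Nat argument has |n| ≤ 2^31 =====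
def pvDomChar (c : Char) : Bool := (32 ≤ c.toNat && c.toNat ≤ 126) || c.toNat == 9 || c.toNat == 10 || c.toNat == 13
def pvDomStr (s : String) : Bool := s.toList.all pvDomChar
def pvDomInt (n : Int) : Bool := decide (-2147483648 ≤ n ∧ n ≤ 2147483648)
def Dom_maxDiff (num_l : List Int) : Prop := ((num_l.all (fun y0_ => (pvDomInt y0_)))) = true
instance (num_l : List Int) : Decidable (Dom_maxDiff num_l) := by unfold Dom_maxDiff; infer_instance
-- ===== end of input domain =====

-- B replaces A's forward running-minimum pass with a right-to-left suffix-maximum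
-- build followed by a forward scan (alternative decomposition, same return value).
-- Both Pythons raise IndexError on the empty list, excluded by Pre_maxDiff.

-- ===== PORT A =====
-- the for-loop over range(1, len): state (max_diff, min_num)
def pvAFold : List Int → Int × Int → Int × Int
  | [], s => s
  | n :: t, s => pvAFold t (if n > s.2 then (max s.1 (n - s.2), s.2) else (s.1, n))

def maxDiff (num_l : List Int) : Int :=
  match num_l with
  | [] => -1           -- unreachable under Pre_maxDiff (Python raises IndexError)
  | x :: xs => (pvAFold xs (-1, x)).1

-- ===== PORT B =====
-- right-to-left pass of B: returns (max of the list, best_after list)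
def pvBStep : List Int → Int × Int
  | [] => (0, 0)       -- unreachable
  | [x] => (x, 0)
  | x :: y :: t =>
      let p := pvBStep (y :: t)
      (if x > p.1 then x else p.1, p.1)

-- builds the best_after list (length n-1, positions 0..n-2) right-to-left
def pvBAfter : List Int → List Int
  | [] => []
  | [_] => []
  | _ :: y :: t => (pvBStep (y :: t)).1 :: pvBAfter (y :: t)

-- the forward scan of B over (num_l[i], best_after[i])
def pvZF : List (Int × Int) → Int → Int
  | [], a => a
  | p :: ps, a => pvZF ps (if p.2 > p.1 then max a (p.2 - p.1) else a)

def maxDiff_alt (num_l : List Int) : Int :=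
  match num_l with
  | [] => -1           -- unreachable under Pre_maxDiff (Python raises IndexError)
  | _ => pvZF (num_l.zip (pvBAfter num_l)) (-1)

-- ===== PRECONDITION & SPEC =====
-- A (num_l[0]) and B (num_l[-1]) both raise IndexError on the empty list
def Pre_maxDiff (num_l : List Int) : Prop := num_l ≠ []
instance (num_l : List Int) : Decidable (Pre_maxDiff num_l) := by unfold Pre_maxDiff; infer_instance
def pvWitness_maxDiff : List Int := ([1, 5, 2])

def Spec_maxDiff (num_l : List Int) (out : Int) : Prop := out = maxDiff_alt num_l
instance (num_l : List Int) (out : Int) : Decidable (Spec_maxDiff num_l out) := by unfold Spec_maxDiff; infer_instance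

-- ===== CLAIM (what is proved, stated in full; the proofs are below) =====
def Claim_equal_maxDiff : Prop := ∀ (num_l : List Int), Dom_maxDiff num_l → Pre_maxDiff num_l → Spec_maxDiff num_l (maxDiff num_l)

-- ===== LEMMAS AND PROOFS =====

-- best positive difference against base x over list t, accumulated into s
def pvG (x : Int) : List Int → Int → Int
  | [], s => s
  | y :: t, s => pvG x t (if y > x then max s (y - x) else s)

-- max over pairs i<j with l[j] > l[i] of l[j]-l[i], floored at -1
def pvPd : List Int → Int
  | [] => -1
  | x :: xs => pvG x xs (pvPd xs)

theorem pvG_le_self (x : Int) (t : List Int) (s : Int) : s ≤ pvG x t s := by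
  induction t generalizing s with
  | nil => simp [pvG]
  | cons y t ih =>
    simp only [pvG]
    refine le_trans ?_ (ih _)
    split <;> omega

theorem pvG_eq (x : Int) (t : List Int) (s : Int) (hs : -1 ≤ s) :
    pvG x t s = max s (pvG x t (-1)) := by
  induction t generalizing s with
  | nil => simp [pvG]; omega
  | cons y t ih =>
    simp only [pvG]
    by_cases h : y > x
    · rw [if_pos h, if_pos h, ih (max s (y - x)) (by omega), ih (max (-1) (y - x)) (by omega)]
      omega
    · rw [if_neg h, if_neg h, ih s hs]

theorem pvG_mono (t : List Int) (n m a a' : Int) (hnm : n ≤ m) (ha : a ≤ a') :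
    pvG m t a ≤ pvG n t a' := by
  induction t generalizing a a' with
  | nil => simpa [pvG]
  | cons y t ih =>
    simp only [pvG]
    apply ih
    split <;> split <;> omega

theorem pvPd_ge (l : List Int) : -1 ≤ pvPd l := by
  cases l with
  | nil => simp [pvPd]
  | cons x xs => exact le_trans (pvPd_ge xs) (pvG_le_self _ _ _)

theorem pvPd_cons (x : Int) (xs : List Int) :
    pvPd (x :: xs) = max (pvPd xs) (pvG x xs (-1)) := by
  simp only [pvPd]
  rw [pvG_eq x xs (pvPd xs) (pvPd_ge xs)]

-- A's loop invariant: the result is the accumulator maxed with the answer for m :: xs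
theorem pvAFold_eq (xs : List Int) (d m : Int) (hd : -1 ≤ d) :
    (pvAFold xs (d, m)).1 = max d (pvPd (m :: xs)) := by
  induction xs generalizing d m with
  | nil =>
    simp only [pvAFold, pvPd, pvG]
    omega
  | cons n t ih =>
    have hNmono : pvG n t (-1) ≤ pvG m t (-1) ∨ pvG m t (-1) ≤ pvG n t (-1) := by
      rcases le_total n m with h | h
      · exact Or.inr (pvG_mono t n m (-1) (-1) h le_rfl)
      · exact Or.inl (pvG_mono t m n (-1) (-1) h le_rfl)
    simp only [pvAFold]
    by_cases h : n > m
    · rw [if_pos h, ih (max d (n - m)) m (by omega)]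
      rw [pvPd_cons m (n :: t), pvPd_cons n t, pvPd_cons m t]
      simp only [pvG]
      rw [if_pos h, pvG_eq m t (max (-1) (n - m)) (by omega)]
      have := pvG_mono t m n (-1) (-1) (le_of_lt h) le_rfl
      have := pvPd_ge t
      omega
    · rw [if_neg h, ih d n hd]
      rw [pvPd_cons m (n :: t), pvPd_cons n t]
      simp only [pvG]
      rw [if_neg h]
      have := pvG_mono t n m (-1) (-1) (by omega) le_rfl
      have := pvPd_ge t
      omega

theorem maxDiff_eq_pd (x : Int) (xs : List Int) : maxDiff (x :: xs) = pvPd (x :: xs) := by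
  simp only [maxDiff]
  rw [pvAFold_eq xs (-1) x le_rfl]
  have := pvPd_ge (x :: xs)
  omega

theorem pvG_cons (x y : Int) (t : List Int) (s : Int) :
    pvG x (y :: t) s = pvG x t (if y > x then max s (y - x) else s) := rfl

-- pvG against x of a nonempty list, started at -1, in terms of the list's maximum
theorem pvG_neg_one (xs : List Int) (x : Int) (h : xs ≠ []) :
    pvG x xs (-1) = if (pvBStep xs).1 > x then (pvBStep xs).1 - x else -1 := by
  induction xs generalizing x with
  | nil => exact absurd rfl h
  | cons y t ih =>
    cases t with
    | nil =>
      simp only [pvG, pvBStep]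
      split <;> simp
      omega
    | cons z t' =>
      rw [pvG_cons]
      simp only [pvBStep]
      rw [pvG_eq x (z :: t') (if y > x then max (-1) (y - x) else -1) (by split <;> omega)]
      rw [ih x (by simp)]
      split <;> split <;> omega

-- B's forward scan equals the pair-max spec
theorem pvZF_eq (xs : List Int) (x a : Int) (ha : -1 ≤ a) :
    pvZF ((x :: xs).zip (pvBAfter (x :: xs))) a = max a (pvPd (x :: xs)) := by
  induction xs generalizing x a with
  | nil =>
    simp [pvBAfter, List.zip_nil_right, pvZF, pvPd, pvG]
    omega
  | cons y t ih =>
    simp only [pvBAfter, List.zip_cons_cons, pvZF]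
    rw [ih y _ (by split <;> omega)]
    rw [pvPd_cons x (y :: t)]
    rw [pvG_neg_one (y :: t) x (by simp)]
    have := pvPd_ge (y :: t)
    split <;> omega

-- ===== VERDICT (by name: the statement is the Claim_ definition above) =====
theorem maxDiff_spec : Claim_equal_maxDiff := by
  intro num_l _ hpre
  unfold Spec_maxDiff
  cases num_l with
  | nil => exact absurd rfl hpre
  | cons x xs =>
    rw [maxDiff_eq_pd]
    simp only [maxDiff_alt]
    rw [pvZF_eq xs x (-1) le_rfl]
    have := pvPd_ge (x :: xs)
    omega
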